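-- pv_equiv track=rewrite | github.com/KBlixt/Trailer-Downloader | organizing.py | get_movie_folder
-- ===== SOURCE A (Python) =====
-- def get_movie_folder(earlier_tries, have, have_not):
--
--     min_earlier_tries = 10000
--     max_earlier_tries = 0
--
--     for movie in earlier_tries:
--         if earlier_tries[movie] < min_earlier_tries:
--             min_earlier_tries = earlier_tries[movie]
--
--         if earlier_tries[movie] > max_earlier_tries:
--             max_earlier_tries = earlier_tries[movie]
--
--     while True:
--         for movie in earlier_tries:
--             if earlier_tries[movie] > min_earlier_tries:
--                 continue
--
--             for word in have:
--                 if word not in movie.lower():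
--                     continue
--
--             for word in have_not:
--                 if word in movie.lower():
--                     continue
--
--             return movie
--
--         if min_earlier_tries >= max_earlier_tries:
--             break
--
--         min_earlier_tries += 1
--
--     raise Exception("Couldn't find a movie in the library matching the given restriction")
-- ===== SOURCE B (Python) =====
-- def get_movie_folder(earlier_tries, have, have_not):
--     # The `have`/`have_not` word loops in the original are no-ops (the
--     # `continue` statements only continue those inner loops), and the
--     # threshold-raising while-loop just locates the minimum value, so the
--     # function returns the first key with the minimal value.
--     if not earlier_tries:
--         raise Exception("Couldn't find a movie in the library matching the given restriction")
--     return min(earlier_tries, key=earlier_tries.get)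
-- ===== Notes on version B (the rewrite author's own statement) =====
-- stated objective: simpler
-- what changed: B recognises that the have/have_not word loops are no-ops and the threshold-raising while-loop only locates the minimum value, so it returns the first dict key with minimal value via a single min() with key=earlier_tries.get.
import Mathlib
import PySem

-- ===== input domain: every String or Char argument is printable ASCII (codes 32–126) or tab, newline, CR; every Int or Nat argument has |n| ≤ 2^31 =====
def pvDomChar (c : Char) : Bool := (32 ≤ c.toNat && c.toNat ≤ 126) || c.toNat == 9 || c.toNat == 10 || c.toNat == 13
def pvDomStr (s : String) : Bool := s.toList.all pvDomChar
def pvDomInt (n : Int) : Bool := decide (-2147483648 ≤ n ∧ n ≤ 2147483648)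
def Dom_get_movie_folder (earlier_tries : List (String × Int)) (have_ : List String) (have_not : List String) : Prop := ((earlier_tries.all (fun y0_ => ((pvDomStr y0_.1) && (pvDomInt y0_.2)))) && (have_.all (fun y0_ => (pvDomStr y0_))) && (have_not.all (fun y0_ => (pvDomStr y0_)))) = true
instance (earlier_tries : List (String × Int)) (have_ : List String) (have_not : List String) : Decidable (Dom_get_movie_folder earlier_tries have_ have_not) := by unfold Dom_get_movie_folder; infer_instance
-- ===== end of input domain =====

-- B replaces A's no-op word loops and threshold-raising while-loop by a single first-minimum scan (simpler).


-- ===== PORT A =====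
-- dict lookup `earlier_tries[movie]` (first match; the key is always present, default unreachable)
def pvLookup (d : List (String × Int)) (k : String) : Int := (List.lookup k d).getD 0

-- the inner `for movie in earlier_tries:` pass of the while-body: return the first key whose
-- value is ≤ the threshold.  The two `for word in have/have_not` loops of A only `continue`
-- their own (inner) loop, so they have no effect and contribute nothing to port.
def pvScanA (d : List (String × Int)) (t : Int) : List (String × Int) → Option String
  | [] => none
  | q :: l => if pvLookup d q.1 > t then pvScanA d t l else some q.1

-- `while True:` — raises (ported as "") when the threshold reaches max without a hit
def pvLoopA (d : List (String × Int)) (maxET t : Int) : String :=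
  match pvScanA d t d with
  | some k => k
  | none => if _h : maxET ≤ t then "" else pvLoopA d maxET (t + 1)
termination_by (maxET - t).toNat
decreasing_by omega

def get_movie_folder (earlier_tries : List (String × Int)) (have_ : List String) (have_not : List String) : String :=
  let minET := earlier_tries.foldl (fun m q => if pvLookup earlier_tries q.1 < m then pvLookup earlier_tries q.1 else m) 10000
  let maxET := earlier_tries.foldl (fun m q => if pvLookup earlier_tries q.1 > m then pvLookup earlier_tries q.1 else m) 0
  pvLoopA earlier_tries maxET minET

-- ===== PORT B =====
-- min(earlier_tries, key=earlier_tries.get): first key with strictly minimal looked-up value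
def get_movie_folder_alt (earlier_tries : List (String × Int)) (have_ : List String) (have_not : List String) : String :=
  match earlier_tries with
  | [] => ""   -- B raises Exception here (outside Pre_)
  | p :: rest =>
    rest.foldl (fun acc q => if pvLookup earlier_tries q.1 < pvLookup earlier_tries acc then q.1 else acc) p.1

-- ===== PRECONDITION & SPEC =====
-- Pre_ excludes only the empty dict, on which A raises Exception (B raises the same Exception).
def Pre_get_movie_folder (earlier_tries : List (String × Int)) (have_ : List String) (have_not : List String) : Prop := earlier_tries ≠ []
instance (earlier_tries : List (String × Int)) (have_ : List String) (have_not : List String) : Decidable (Pre_get_movie_folder earlier_tries have_ have_not) := by unfold Pre_get_movie_folder; infer_instance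

def pvWitness_get_movie_folder : (List (String × Int)) × List String × List String := ([("Alien (1979)", 2), ("Blade (1998)", 1)], ["a"], ["x"])

def Spec_get_movie_folder (earlier_tries : List (String × Int)) (have_ : List String) (have_not : List String) (out : String) : Prop := out = get_movie_folder_alt earlier_tries have_ have_not
instance (earlier_tries : List (String × Int)) (have_ : List String) (have_not : List String) (out : String) : Decidable (Spec_get_movie_folder earlier_tries have_ have_not out) := by unfold Spec_get_movie_folder; infer_instance

-- ===== CLAIM (what is proved, stated in full; the proofs are below) =====
def Claim_equal_get_movie_folder : Prop := ∀ (earlier_tries : List (String × Int)) (have_ : List String) (have_not : List String), Dom_get_movie_folder earlier_tries have_ have_not → Pre_get_movie_folder earlier_tries have_ have_not → Spec_get_movie_folder earlier_tries have_ have_not (get_movie_folder earlier_tries have_ have_not)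

-- ===== LEMMAS AND PROOFS =====

-- proof-side name for A's min-fold (definitionally the fold in get_movie_folder)
def pvGmin (d : List (String × Int)) (a : Int) (l : List (String × Int)) : Int :=
  l.foldl (fun m q => if pvLookup d q.1 < m then pvLookup d q.1 else m) a

def pvGmax (d : List (String × Int)) (a : Int) (l : List (String × Int)) : Int :=
  l.foldl (fun m q => if pvLookup d q.1 > m then pvLookup d q.1 else m) a

def pvFoldB (d : List (String × Int)) (a : String) (l : List (String × Int)) : String :=
  l.foldl (fun acc q => if pvLookup d q.1 < pvLookup d acc then q.1 else acc) a

theorem pvGmin_le_init (d : List (String × Int)) (l : List (String × Int)) : ∀ a, pvGmin d a l ≤ a := by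
  induction l with
  | nil => intro a; simp [pvGmin]
  | cons q l ih =>
    intro a
    have h := ih (if pvLookup d q.1 < a then pvLookup d q.1 else a)
    simp only [pvGmin, List.foldl] at *
    split_ifs at h ⊢ <;> omega

theorem pvGmin_le_mem (d : List (String × Int)) (l : List (String × Int)) :
    ∀ a q, q ∈ l → pvGmin d a l ≤ pvLookup d q.1 := by
  induction l with
  | nil => intro a q h; simp at h
  | cons r l ih =>
    intro a q h
    rcases List.mem_cons.mp h with h | h
    · subst h
      have h2 := pvGmin_le_init d l (if pvLookup d q.1 < a then pvLookup d q.1 else a)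
      simp only [pvGmin, List.foldl] at *
      split_ifs at h2 ⊢ <;> omega
    · exact ih _ q h

theorem pvGmin_mono (d : List (String × Int)) (l : List (String × Int)) :
    ∀ a b, a ≤ b → pvGmin d a l ≤ pvGmin d b l := by
  induction l with
  | nil => intro a b h; simpa [pvGmin] using h
  | cons q l ih =>
    intro a b h
    simp only [pvGmin, List.foldl]
    apply ih
    split_ifs <;> omega

theorem pvScanA_none (d : List (String × Int)) (t : Int) (l : List (String × Int))
    (h : ∀ q ∈ l, t < pvLookup d q.1) : pvScanA d t l = none := by
  induction l with
  | nil => rfl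
  | cons q l ih =>
    have hq := h q (List.mem_cons_self ..)
    simp only [pvScanA]
    rw [if_pos hq]
    exact ih (fun r hr => h r (List.mem_cons_of_mem _ hr))

-- B's fold result is exactly what A's scan at the minimum threshold returns
theorem pvB_scan (d : List (String × Int)) (l : List (String × Int)) :
    ∀ q0 : String × Int,
      pvScanA d (pvGmin d (pvLookup d q0.1) l) (q0 :: l) = some (pvFoldB d q0.1 l) := by
  induction l with
  | nil =>
    intro q0
    simp [pvScanA, pvGmin, pvFoldB]
  | cons q l ih =>
    intro q0
    by_cases hlt : pvLookup d q.1 < pvLookup d q0.1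
    · -- new running minimum: continue with q
      have hm : pvGmin d (pvLookup d q0.1) (q :: l) = pvGmin d (pvLookup d q.1) l := by
        simp only [pvGmin, List.foldl, if_pos hlt]
      have hml : pvGmin d (pvLookup d q.1) l ≤ pvLookup d q.1 := pvGmin_le_init d l _
      have := ih q
      simp only [pvScanA] at this ⊢
      rw [hm, if_pos (by omega)]
      simp only [pvFoldB, List.foldl, if_pos hlt]
      exact this
    · -- keep q0 as running minimum
      have hm : pvGmin d (pvLookup d q0.1) (q :: l) = pvGmin d (pvLookup d q0.1) l := by
        simp only [pvGmin, List.foldl, if_neg hlt]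
      have := ih q0
      simp only [pvScanA] at this ⊢
      rw [hm]
      by_cases hskip : pvGmin d (pvLookup d q0.1) l < pvLookup d q0.1
      · -- threshold below f q0, hence also below f q: both scans skip their head
        rw [if_pos (by omega), if_pos (by omega)]
        rw [if_pos (by omega)] at this
        simp only [pvFoldB, List.foldl, if_neg hlt]
        exact this
      · rw [if_neg (by omega)]
        simp only [pvFoldB, List.foldl, if_neg hlt]
        rw [if_neg (by omega)] at this
        injection this with h
        exact congrArg some h

theorem pvLoop_hits (d : List (String × Int)) (maxET m : Int) (k : String)
    (hscan : pvScanA d m d = some k)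
    (hnone : ∀ t, t < m → pvScanA d t d = none)
    (hmax : m ≤ maxET) :
    ∀ t, t ≤ m → pvLoopA d maxET t = k := by
  have H : ∀ n, ∀ t, (m - t).toNat = n → t ≤ m → pvLoopA d maxET t = k := by
    intro n
    induction n using Nat.strong_induction_on with
    | _ n ih =>
      intro t hn ht
      rw [pvLoopA]
      by_cases he : t = m
      · subst he; rw [hscan]
      · have hlt : t < m := lt_of_le_of_ne ht he
        rw [hnone t hlt]
        simp only
        rw [dif_neg (by omega)]
        exact ih ((m - (t + 1)).toNat) (by omega) (t + 1) rfl (by omega)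
  intro t ht
  exact H ((m - t).toNat) t rfl ht

-- ===== VERDICT (by name: the statement is the Claim_ definition above) =====
theorem get_movie_folder_spec : Claim_equal_get_movie_folder := by
  intro earlier_tries have_ have_not _hdom hpre
  unfold Spec_get_movie_folder
  match earlier_tries, hpre with
  | p :: rest, _ =>
    set d := p :: rest with hd
    -- the true minimum of the looked-up values
    set m := pvGmin d (pvLookup d p.1) rest with hm
    have hscan : pvScanA d m d = some (pvFoldB d p.1 rest) := pvB_scan d rest p
    have hnone : ∀ t, t < m → pvScanA d t d = none := by
      intro t ht
      apply pvScanA_none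
      intro q hq
      rcases List.mem_cons.mp hq with h | h
      · have := pvGmin_le_init d rest (pvLookup d p.1); subst h; omega
      · have := pvGmin_le_mem d rest (pvLookup d p.1) q h; omega
    show pvLoopA d (pvGmax d 0 d) (pvGmin d 10000 d) = pvFoldB d p.1 rest
    have hmax : m ≤ pvGmax d 0 d := by
      have h1 : pvLookup d p.1 ≤ pvGmax d 0 d := by
        have h2 : ∀ (l : List (String × Int)) (a : Int), a ≤ pvGmax d a l := by
          intro l
          induction l with
          | nil => intro a; simp [pvGmax]
          | cons q l ih =>
            intro a
            have := ih (if pvLookup d q.1 > a then pvLookup d q.1 else a)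
            simp only [pvGmax, List.foldl] at *
            split_ifs at this ⊢ <;> omega
        have h3 := h2 rest (if pvLookup d p.1 > 0 then pvLookup d p.1 else 0)
        have h4 : pvGmax d 0 d = pvGmax d (if pvLookup d p.1 > 0 then pvLookup d p.1 else 0) rest := by
          conv_lhs => rw [hd]
          simp only [pvGmax, List.foldl]
          rw [← hd]
        rw [h4]
        split_ifs at h3 ⊢ <;> omega
      have := pvGmin_le_init d rest (pvLookup d p.1)
      omega
    have hminle : pvGmin d 10000 d ≤ m := by
      have : pvGmin d 10000 (p :: rest) = pvGmin d (if pvLookup d p.1 < 10000 then pvLookup d p.1 else 10000) rest := by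
        simp only [pvGmin, List.foldl]
      rw [this]
      apply pvGmin_mono
      split_ifs <;> omega
    exact pvLoop_hits d (pvGmax d 0 d) m (pvFoldB d p.1 rest) hscan hnone hmax _ hminle
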